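-- pv_equiv track=rewrite | github.com/manarmohammed554-blip/Assignment2 | MaialiManarA2Q3.py | getPriceDecreaseStats
-- ===== SOURCE A (Python) =====
-- def getPriceDecreaseStats(Data: list) -> tuple:
--     """
--     Purpose:
--         Calculate the decreasing change in the data, with the minimum difference.
--
--     Paramters:
--         Data: a list of tuples containing bitcoin info.
--
--     Returns:
--         A tuple containing:
--         minDiff: integer representing the min difference in price in subsequent days.
--         minIndex: the index representing the index of the minimum price in the list.
--         numOfDays: integer representing the number of days with a decrease in price.
--     """
--     numOfDays = 0
--     minIndex = 0
--     minDiff = 1000000000000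
--
--     for index in range(1, len(Data)):
--         tempVal = Data[index][1] - Data[index - 1][1]
--         if tempVal < 0:
--             numOfDays += 1
--             if tempVal < minDiff:
--                 minDiff = tempVal
--                 minIndex = index
--     outputTuple = (minDiff, minIndex, numOfDays)
--     return outputTuple
-- ===== SOURCE B (Python) =====
-- def _stats_of_diffs(diffs):
--     numOfDays = sum(1 for d in diffs if d < 0)
--     negs = [d for d in diffs if d < 0]
--     if negs:
--         m = min(negs)
--         return (m, diffs.index(m) + 1, numOfDays)
--     return (1000000000000, 0, numOfDays)
--
--
-- def getPriceDecreaseStats(Data: list) -> tuple: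
--     diffs = [Data[i][1] - Data[i - 1][1] for i in range(1, len(Data))]
--     return _stats_of_diffs(diffs)
-- ===== Notes on version B (the rewrite author's own statement) =====
-- stated objective: alternative
-- what changed: Replaced A's single fused index loop carrying three accumulators by a precompute-then-reduce structure: build the list of consecutive differences once, then obtain the count as a sum over the negatives, the minimum via min(), and its position via first-occurrence .index().
import Mathlib
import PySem

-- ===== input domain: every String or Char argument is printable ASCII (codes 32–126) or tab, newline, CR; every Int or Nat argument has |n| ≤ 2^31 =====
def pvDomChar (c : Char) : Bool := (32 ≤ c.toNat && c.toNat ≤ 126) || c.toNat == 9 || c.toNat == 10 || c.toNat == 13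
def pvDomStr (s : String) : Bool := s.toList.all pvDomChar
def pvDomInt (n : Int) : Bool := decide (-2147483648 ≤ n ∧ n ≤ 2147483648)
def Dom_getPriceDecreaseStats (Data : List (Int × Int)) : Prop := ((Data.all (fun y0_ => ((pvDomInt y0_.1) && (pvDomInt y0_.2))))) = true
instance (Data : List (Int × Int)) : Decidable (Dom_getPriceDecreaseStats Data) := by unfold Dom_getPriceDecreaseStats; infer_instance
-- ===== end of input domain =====

-- B replaces A's fused one-loop accumulation by a precompute-the-diffs-then-reduce decomposition (alternative structure, same cost).

-- ===== PORT A =====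
-- loop over range(1, len(Data)); indices are always in range, so pyGetD's default is never used
def getPriceDecreaseStats (Data : List (Int × Int)) : Int × Int × Int :=
  (PySem.List.pyRange 1 (PySem.List.len Data) 1).foldl
    (fun st index =>
      let tempVal := (PySem.List.pyGetD Data index ((0 : Int), (0 : Int))).2
                   - (PySem.List.pyGetD Data (index - 1) ((0 : Int), (0 : Int))).2
      if tempVal < 0 then
        if tempVal < st.1 then (tempVal, index, st.2.2 + 1)
        else (st.1, st.2.1, st.2.2 + 1)
      else st)
    (1000000000000, 0, 0)

-- ===== PORT B =====
-- _stats_of_diffs: each statistic by its own reduction over the diffs list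
-- (m is a member of diffs there, so .index never raises and getD's default is never used)
def statsOfDiffs (diffs : List Int) : Int × Int × Int :=
  let numOfDays : Int := ((diffs.filter (fun d => d < 0)).map (fun _ => (1 : Int))).sum
  let negs := diffs.filter (fun d => d < 0)
  match PySem.List.min? negs (fun y => y) with
  | some m => (m, ((PySem.List.index? diffs m).getD 0 : Int) + 1, numOfDays)
  | none => (1000000000000, 0, numOfDays)

def getPriceDecreaseStats_alt (Data : List (Int × Int)) : Int × Int × Int :=
  statsOfDiffs ((PySem.List.pyRange 1 (PySem.List.len Data) 1).map
    (fun i => (PySem.List.pyGetD Data i ((0 : Int), (0 : Int))).2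
            - (PySem.List.pyGetD Data (i - 1) ((0 : Int), (0 : Int))).2))

-- ===== PRECONDITION & SPEC =====
def Spec_getPriceDecreaseStats (Data : List (Int × Int)) (out : Int × Int × Int) : Prop := out = getPriceDecreaseStats_alt Data
instance (Data : List (Int × Int)) (out : Int × Int × Int) : Decidable (Spec_getPriceDecreaseStats Data out) := by unfold Spec_getPriceDecreaseStats; infer_instance

-- ===== CLAIM (what is proved, stated in full; the proofs are below) =====
def Claim_equal_getPriceDecreaseStats : Prop := ∀ (Data : List (Int × Int)), Dom_getPriceDecreaseStats Data → Spec_getPriceDecreaseStats Data (getPriceDecreaseStats Data)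

-- ===== LEMMAS AND PROOFS =====

-- A's loop rewritten as a recursion over the diff values, carrying the running index
def loopA : List Int → Int → (Int × Int × Int) → Int × Int × Int
  | [], _, st => st
  | d :: t, i, st =>
      loopA t (i + 1)
        (if d < 0 then
           (if d < st.1 then (d, i, st.2.2 + 1) else (st.1, st.2.1, st.2.2 + 1))
         else st)

theorem loopA_append (t : List Int) (d : Int) : ∀ (i : Int) (st : Int × Int × Int),
    loopA (t ++ [d]) i st =
      (if d < 0 then
        (if d < (loopA t i st).1 then (d, i + t.length, (loopA t i st).2.2 + 1)
         else ((loopA t i st).1, (loopA t i st).2.1, (loopA t i st).2.2 + 1))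
       else loopA t i st) := by
  induction t with
  | nil => intro i st; simp [loopA]
  | cons x t ih =>
      intro i st
      simp only [List.cons_append, loopA, ih]
      have : i + 1 + (t.length : Int) = i + (x :: t).length := by simp; ring
      rw [this]

theorem foldA_eq (g : Int → Int) (n : Int) : ∀ (k : Nat) (a : Int) (st : Int × Int × Int), (n - a).toNat = k →
    (PySem.List.pyRange a n 1).foldl
      (fun st index =>
        let tempVal := g index
        if tempVal < 0 then
          if tempVal < st.1 then (tempVal, index, st.2.2 + 1)
          else (st.1, st.2.1, st.2.2 + 1)
        else st) st
    = loopA ((PySem.List.pyRange a n 1).map g) a st := by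
  intro k
  induction k with
  | zero =>
      intro a st hk
      have h : n ≤ a := by omega
      rw [PySem.List.pyRange_one_eq_nil h]; simp [loopA]
  | succ k ih =>
      intro a st hk
      by_cases h : a < n
      · rw [PySem.List.pyRange_one_cons h]
        simp only [List.foldl_cons, List.map_cons, loopA]
        exact ih (a + 1) _ (by omega)
      · rw [PySem.List.pyRange_one_eq_nil (by omega)]; simp [loopA]

theorem stats_nil : statsOfDiffs [] = (1000000000000, 0, 0) := by decide

-- the B decomposition absorbs one more diff exactly as A's loop body does
theorem stats_append (t : List Int) (d : Int) :
    statsOfDiffs (t ++ [d]) =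
      (if d < 0 then
        (if d < (statsOfDiffs t).1 then (d, 1 + (t.length : Int), (statsOfDiffs t).2.2 + 1)
         else ((statsOfDiffs t).1, (statsOfDiffs t).2.1, (statsOfDiffs t).2.2 + 1))
       else statsOfDiffs t) := by
  by_cases hd : d < 0
  · -- d is a new negative diff
    have hfil : (t ++ [d]).filter (fun d => d < 0) = t.filter (fun d => d < 0) ++ [d] := by
      simp [List.filter_append, hd]
    rcases hneg : t.filter (fun d => d < 0) with _ | ⟨x, nt⟩
    · -- no negative diff in t : d becomes the (first) minimum
      have hnone : PySem.List.min? (t.filter (fun d => d < 0)) (fun y => y) = none := by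
        rw [hneg]; simp [PySem.List.min?]
      have hnotin : d ∉ t := by
        intro hmem
        have : d ∈ t.filter (fun d => d < 0) := List.mem_filter.mpr ⟨hmem, by simpa using hd⟩
        rw [hneg] at this; simp at this
      have hidx : List.idxOf? d (t ++ [d]) = some t.length := by
        simpa using PySem.List.index?_append_singleton_self t d hnotin
      have hmin1 : PySem.List.min? ((t.filter (fun d => d < 0)) ++ [d]) (fun y => y) = some d := by
        rw [hneg]; simp [PySem.List.min?]
      simp only [statsOfDiffs]
      rw [hfil, hmin1, hnone]
      have hd' : d < (1000000000000 : Int) := by omega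
      simp [hidx, hneg, hd, hd', add_comm]
    · -- t already has negatives, with first minimum m
      have hm : PySem.List.min? (t.filter (fun d => d < 0)) (fun y => y)
          = some (nt.foldl min x) := by
        rw [hneg]; exact PySem.List.min?_id_cons x nt
      set m := nt.foldl min x with hmdef
      have hmmem : m ∈ t.filter (fun d => d < 0) := PySem.List.min?_mem hm
      have hmint : m ∈ t := (List.mem_filter.mp hmmem).1
      have hmmin : ∀ y ∈ t.filter (fun d => d < 0), m ≤ y := by
        intro y hy; exact PySem.List.min?_isMin hm y hy
      have hmin' : PySem.List.min? (t.filter (fun d => d < 0) ++ [d]) (fun y => y)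
          = some (min m d) := by
        rw [hneg, List.cons_append, PySem.List.min?_id_cons x (nt ++ [d])]
        simp [List.foldl_append, ← hmdef]
      by_cases hdm : d < m
      · -- strictly smaller: new minimum d, first occurrence at the end
        have hnotin : d ∉ t := by
          intro hmem
          have : d ∈ t.filter (fun d => d < 0) := List.mem_filter.mpr ⟨hmem, by simpa using hd⟩
          exact absurd (hmmin d this) (by omega)
        have hidx : List.idxOf? d (t ++ [d]) = some t.length := by
          simpa using PySem.List.index?_append_singleton_self t d hnotin
        have hmind : min m d = d := by omega
        simp only [statsOfDiffs]
        rw [hfil, hmin', hmind, hm]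
        simp [hidx, hd, hdm, add_comm]
      · -- m stays the minimum, and its first occurrence is unchanged
        have hidx : List.idxOf? m (t ++ [d]) = List.idxOf? m t := by
          simpa using PySem.List.index?_append_of_mem ([d]) hmint
        have hminm : min m d = m := by omega
        simp only [statsOfDiffs]
        rw [hfil, hmin', hminm, hm]
        simp [hidx, hd, hdm]
  · -- d ≥ 0 : nothing changes
    have hfil : (t ++ [d]).filter (fun d => d < 0) = t.filter (fun d => d < 0) := by
      simp [List.filter_append, hd]
    rcases hneg : PySem.List.min? (t.filter (fun d => d < 0)) (fun y => y) with _ | m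
    · simp only [statsOfDiffs]
      rw [hfil, hneg]
      simp [hd]
    · have hmint : m ∈ t := (List.mem_filter.mp (PySem.List.min?_mem hneg)).1
      have hidx : List.idxOf? m (t ++ [d]) = List.idxOf? m t := by
        simpa using PySem.List.index?_append_of_mem ([d]) hmint
      simp only [statsOfDiffs]
      rw [hfil, hneg]
      simp [hidx, hd]

theorem loop_eq_stats (diffs : List Int) :
    loopA diffs 1 (1000000000000, 0, 0) = statsOfDiffs diffs := by
  induction diffs using List.reverseRecOn with
  | nil => simp [loopA, stats_nil]
  | append_singleton t d ih =>
      rw [loopA_append, ih, stats_append, add_comm (1 : Int)]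

-- ===== VERDICT (by name: the statement is the Claim_ definition above) =====
theorem getPriceDecreaseStats_spec : Claim_equal_getPriceDecreaseStats := by
  intro Data _
  show getPriceDecreaseStats Data = getPriceDecreaseStats_alt Data
  unfold getPriceDecreaseStats getPriceDecreaseStats_alt
  rw [foldA_eq _ (PySem.List.len Data) (PySem.List.len Data - 1).toNat 1 _ rfl]
  exact loop_eq_stats _
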